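-- pv_equiv track=rewrite | github.com/jerbear472/WaveSight | SERVER/sentiment_server.py | categorize_by_topic
-- ===== SOURCE A (Python) =====
-- def categorize_by_topic(topic):
--     """Categorize topic by cultural domain"""
--     topic_lower = topic.lower()
--
--     if any(term in topic_lower for term in ['ai', 'crypto', 'tech', 'digital', 'virtual']):
--         return 'Technology'
--     elif any(term in topic_lower for term in ['fashion', 'music', 'art', 'design', 'creative']):
--         return 'Creative'
--     elif any(term in topic_lower for term in ['health', 'fitness', 'wellness', 'mental', 'nutrition']):
--         return 'Lifestyle'
--     elif any(term in topic_lower for term in ['climate', 'environment', 'sustainability', 'green']):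
--         return 'Environmental'
--     elif any(term in topic_lower for term in ['work', 'career', 'business', 'productivity']):
--         return 'Professional'
--     elif any(term in topic_lower for term in ['travel', 'culture', 'social', 'community']):
--         return 'Social'
--     else:
--         return 'Cultural'
-- ===== SOURCE B (Python) =====
-- _LABELS = ['Technology', 'Creative', 'Lifestyle', 'Environmental', 'Professional',
--            'Social', 'Cultural']
--
-- _TERM_GROUP = {
--     'ai': 0, 'crypto': 0, 'tech': 0, 'digital': 0, 'virtual': 0,
--     'fashion': 1, 'music': 1, 'art': 1, 'design': 1, 'creative': 1,
--     'health': 2, 'fitness': 2, 'wellness': 2, 'mental': 2, 'nutrition': 2,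
--     'climate': 3, 'environment': 3, 'sustainability': 3, 'green': 3,
--     'work': 4, 'career': 4, 'business': 4, 'productivity': 4,
--     'travel': 5, 'culture': 5, 'social': 5, 'community': 5,
-- }
--
-- def categorize_by_topic(topic):
--     """Categorize topic: aggregate the minimum group index over ALL matching terms
--     of a flat term->group map (no ordered cascade, no early exit)."""
--     topic_lower = topic.lower()
--     best = min((g for term, g in _TERM_GROUP.items() if term in topic_lower), default=6)
--     return _LABELS[best]
-- ===== Notes on version B (the rewrite author's own statement) =====
-- stated objective: alternative
-- what changed: Replaces the ordered if/elif cascade of per-group any() tests with a flat term->group-index map aggregated by a minimum over all matching terms (no early exit), then an index lookup into a label table; correct because the first matching group of the cascade is exactly the minimal matching group index.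
import Mathlib
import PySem

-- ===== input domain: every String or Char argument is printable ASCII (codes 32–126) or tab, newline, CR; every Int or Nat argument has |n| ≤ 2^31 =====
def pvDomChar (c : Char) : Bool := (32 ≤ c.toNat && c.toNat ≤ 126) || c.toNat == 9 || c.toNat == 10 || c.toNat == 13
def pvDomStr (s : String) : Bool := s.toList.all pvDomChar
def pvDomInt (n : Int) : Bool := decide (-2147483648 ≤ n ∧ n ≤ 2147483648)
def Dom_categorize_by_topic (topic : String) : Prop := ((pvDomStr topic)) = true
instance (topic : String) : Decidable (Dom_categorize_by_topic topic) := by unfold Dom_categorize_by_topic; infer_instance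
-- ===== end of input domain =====

-- B replaces A's if/elif cascade by a flat term->group map aggregated with a minimum
-- group index over all matches (alternative decomposition, same cost).

-- ===== PORT A =====
def categorize_by_topic (topic : String) : String :=
  let topic_lower := PySem.Str.lower topic
  if ["ai", "crypto", "tech", "digital", "virtual"].any (fun term => PySem.Str.isIn term topic_lower) then "Technology"
  else if ["fashion", "music", "art", "design", "creative"].any (fun term => PySem.Str.isIn term topic_lower) then "Creative"
  else if ["health", "fitness", "wellness", "mental", "nutrition"].any (fun term => PySem.Str.isIn term topic_lower) then "Lifestyle"
  else if ["climate", "environment", "sustainability", "green"].any (fun term => PySem.Str.isIn term topic_lower) then "Environmental"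
  else if ["work", "career", "business", "productivity"].any (fun term => PySem.Str.isIn term topic_lower) then "Professional"
  else if ["travel", "culture", "social", "community"].any (fun term => PySem.Str.isIn term topic_lower) then "Social"
  else "Cultural"

-- ===== PORT B =====
def pvLabels : List String :=
  ["Technology", "Creative", "Lifestyle", "Environmental", "Professional", "Social", "Cultural"]

def pvTermGroup : List (String × Nat) :=
  [("ai", 0), ("crypto", 0), ("tech", 0), ("digital", 0), ("virtual", 0),
   ("fashion", 1), ("music", 1), ("art", 1), ("design", 1), ("creative", 1),
   ("health", 2), ("fitness", 2), ("wellness", 2), ("mental", 2), ("nutrition", 2),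
   ("climate", 3), ("environment", 3), ("sustainability", 3), ("green", 3),
   ("work", 4), ("career", 4), ("business", 4), ("productivity", 4),
   ("travel", 5), ("culture", 5), ("social", 5), ("community", 5)]

-- Python's min(generator, default=6) ported as a left fold starting at 6.
def categorize_by_topic_alt (topic : String) : String :=
  let topic_lower := PySem.Str.lower topic
  let best := pvTermGroup.foldl
    (fun acc p => if PySem.Str.isIn p.1 topic_lower then min acc p.2 else acc) 6
  pvLabels.getD best "Cultural"

-- ===== PRECONDITION & SPEC =====
def Spec_categorize_by_topic (topic : String) (out : String) : Prop := out = categorize_by_topic_alt topic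
instance (topic : String) (out : String) : Decidable (Spec_categorize_by_topic topic out) := by unfold Spec_categorize_by_topic; infer_instance

-- ===== CLAIM (what is proved, stated in full; the proofs are below) =====
def Claim_equal_categorize_by_topic : Prop := ∀ (topic : String), Dom_categorize_by_topic topic → Spec_categorize_by_topic topic (categorize_by_topic topic)

-- ===== LEMMAS AND PROOFS =====

-- A fold over a segment whose pairs all carry the same group g collapses to a
-- single conditional 'min acc g' guarded by the segment's any.
theorem pv_seg (tl : String) (g : Nat) (terms : List String) (acc : Nat) :
    (terms.map (fun s => (s, g))).foldl
      (fun acc p => if PySem.Str.isIn p.1 tl then min acc p.2 else acc) acc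
    = if terms.any (fun s => PySem.Str.isIn s tl) then min acc g else acc := by
  induction terms generalizing acc with
  | nil => simp
  | cons h rest ih =>
    simp only [List.map_cons, List.foldl_cons, List.any_cons]
    by_cases hm : PySem.Str.isIn h tl = true
    · simp only [hm, if_true, Bool.true_or, ih]
      split <;> omega
    · simp only [hm, Bool.false_or, ih]
      simp

theorem categorize_by_topic_eq (topic : String) :
    categorize_by_topic topic = categorize_by_topic_alt topic := by
  unfold categorize_by_topic categorize_by_topic_alt
  have hsplit : pvTermGroup
      = (["ai", "crypto", "tech", "digital", "virtual"].map (fun s => (s, 0)))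
        ++ (["fashion", "music", "art", "design", "creative"].map (fun s => (s, 1)))
        ++ (["health", "fitness", "wellness", "mental", "nutrition"].map (fun s => (s, 2)))
        ++ (["climate", "environment", "sustainability", "green"].map (fun s => (s, 3)))
        ++ (["work", "career", "business", "productivity"].map (fun s => (s, 4)))
        ++ (["travel", "culture", "social", "community"].map (fun s => (s, 5))) := rfl
  rw [hsplit]
  simp only [List.foldl_append, pv_seg]
  split_ifs <;> rfl

-- ===== VERDICT (by name: the statement is the Claim_ definition above) =====
theorem categorize_by_topic_spec : Claim_equal_categorize_by_topic := by
  intro topic _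
  exact categorize_by_topic_eq topic
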